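-- pv_equiv track=rewrite | github.com/ucudal/ligaucu-2022 | utils.py | sum_by_common_key
-- ===== SOURCE A (Python) =====
-- def sum_by_common_key(input_list, index_key='ID'):
--     output_dict = {}
--     for d in input_list:
--         index = d[index_key]
--         if index not in output_dict:
--             output_dict[index] = {}
--         for k, v in d.items():
--             if k not in output_dict[index]:
--                 output_dict[index][k] = v
--             elif k != index_key:
--                 output_dict[index][k] += v
--     return output_dict.values()
-- ===== SOURCE B (Python) =====
-- def sum_by_common_key(input_list, index_key='ID'):
--     # Phase 1: partition the dicts into groups sharing the same index_key value.
--     groups = {}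
--     for d in input_list:
--         groups.setdefault(d[index_key], []).append(d)
--
--     # Phase 2: fold each group into a single accumulator dict.
--     def reduce_group(ds):
--         acc = {}
--         for d in ds:
--             for k, v in d.items():
--                 if k not in acc:
--                     acc[k] = v
--                 elif k != index_key:
--                     acc[k] += v
--         return acc
--
--     return {key: reduce_group(ds) for key, ds in groups.items()}.values()
-- ===== Notes on version B (the rewrite author's own statement) =====
-- stated objective: alternative
-- what changed: Replaces A's single interleaved pass that mutates a dict-of-accumulators with two distinct phases: one pass partitions the input dicts into groups keyed by index_key, then each group's list is folded into its accumulator dict.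
import Mathlib
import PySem

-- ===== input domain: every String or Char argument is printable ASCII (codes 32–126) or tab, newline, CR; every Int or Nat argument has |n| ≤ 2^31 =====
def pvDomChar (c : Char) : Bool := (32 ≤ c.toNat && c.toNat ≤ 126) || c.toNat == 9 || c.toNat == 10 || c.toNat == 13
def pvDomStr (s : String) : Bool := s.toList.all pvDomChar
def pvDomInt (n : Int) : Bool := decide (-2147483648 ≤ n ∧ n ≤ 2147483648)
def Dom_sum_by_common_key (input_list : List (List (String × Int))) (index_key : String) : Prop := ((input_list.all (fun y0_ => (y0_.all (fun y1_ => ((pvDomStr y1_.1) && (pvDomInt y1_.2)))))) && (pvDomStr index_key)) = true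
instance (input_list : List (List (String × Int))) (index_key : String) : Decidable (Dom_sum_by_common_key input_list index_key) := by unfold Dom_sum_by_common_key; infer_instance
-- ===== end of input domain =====

-- B restructures A's single interleaved grouping-and-summing pass into two phases
-- (partition by index_key, then fold each group); return value proved equal on Pre_.

-- ===== PORT A =====
-- A: one pass; output_dict maps index value -> accumulator dict, updated field by field.
def sum_by_common_key (input_list : List (List (String × Int))) (index_key : String) : List (List (String × Int)) :=
  let output_dict : PySem.Dict Int (PySem.Dict String Int) :=
    input_list.foldl (fun od d =>
      match List.lookup index_key d with    -- d[index_key]; none = KeyError, excluded by Pre_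
      | none => od
      | some index =>
        let od := if od.contains index then od else od.insert index PySem.Dict.empty
        d.foldl (fun od kv =>
          let inner := od.getD index PySem.Dict.empty
          if inner.contains kv.1 = false then
            od.insert index (inner.insert kv.1 kv.2)
          else if kv.1 ≠ index_key then
            od.insert index (inner.insert kv.1 (inner.getD kv.1 0 + kv.2))  -- += as get-then-set
          else od) od) PySem.Dict.empty
  output_dict.values.map (fun inner => inner.items)

-- ===== PORT B =====
-- B's field merge rule (the body of reduce_group's inner loop in Source B)
def pvMergeField (index_key : String) (acc : PySem.Dict String Int) (kv : String × Int) : PySem.Dict String Int :=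
  if acc.contains kv.1 = false then acc.insert kv.1 kv.2
  else if kv.1 ≠ index_key then acc.insert kv.1 (acc.getD kv.1 0 + kv.2)
  else acc

-- reduce_group from Source B: fold a group's dicts into one accumulator
def pvReduceGroup (index_key : String) (ds : List (List (String × Int))) : PySem.Dict String Int :=
  ds.foldl (fun acc d => d.foldl (pvMergeField index_key) acc) PySem.Dict.empty

def sum_by_common_key_alt (input_list : List (List (String × Int))) (index_key : String) : List (List (String × Int)) :=
  let groups : PySem.Dict Int (List (List (String × Int))) :=
    input_list.foldl (fun g d =>
      match List.lookup index_key d with    -- d[index_key]; none = KeyError, excluded by Pre_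
      | none => g
      | some idx => g.insert idx (g.getD idx [] ++ [d])) PySem.Dict.empty  -- setdefault(..., []).append(d)
  groups.items.map (fun p => (pvReduceGroup index_key p.2).items)

-- ===== PRECONDITION & SPEC =====
-- Pre_ excludes exactly the inputs where some dict lacks index_key: there Python A raises KeyError.
def Pre_sum_by_common_key (input_list : List (List (String × Int))) (index_key : String) : Prop :=
  (input_list.all (fun d => (List.lookup index_key d).isSome)) = true
instance (input_list : List (List (String × Int))) (index_key : String) : Decidable (Pre_sum_by_common_key input_list index_key) := by unfold Pre_sum_by_common_key; infer_instance
def pvWitness_sum_by_common_key : (List (List (String × Int))) × String :=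
  ([[("ID", 1), ("x", 2)], [("ID", 1), ("x", 3)], [("ID", 2), ("x", 4)]], "ID")

def Spec_sum_by_common_key (input_list : List (List (String × Int))) (index_key : String) (out : List (List (String × Int))) : Prop := out = sum_by_common_key_alt input_list index_key
instance (input_list : List (List (String × Int))) (index_key : String) (out : List (List (String × Int))) : Decidable (Spec_sum_by_common_key input_list index_key out) := by unfold Spec_sum_by_common_key; infer_instance

-- ===== CLAIM (what is proved, stated in full; the proofs are below) =====
def Claim_equal_sum_by_common_key : Prop := ∀ (input_list : List (List (String × Int))) (index_key : String), Dom_sum_by_common_key input_list index_key → Pre_sum_by_common_key input_list index_key → Spec_sum_by_common_key input_list index_key (sum_by_common_key input_list index_key)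

-- ===== LEMMAS AND PROOFS =====
-- d.insert k (d.getD k d0) = d when k is present (keys nodup)
theorem pv_insert_getD_self {ν : Type} (d : PySem.Dict Int ν) (k : Int) (d0 : ν)
    (hc : d.contains k = true) (hnd : d.keys.Nodup) : d.insert k (d.getD k d0) = d := by
  apply PySem.Dict.ext
  rw [PySem.Dict.items_insert_of_contains _ _ hc]
  conv_rhs => rw [← List.map_id d.items]
  apply List.map_congr_left
  intro p hp
  by_cases hk : p.1 == k
  · simp only [hk, if_pos]
    have h1 : p.1 = k := by exact_mod_cast (beq_iff_eq.mp hk)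
    have h2 : d.getD p.1 d0 = p.2 := PySem.Dict.getD_of_mem_items d (by simpa using hp) hnd d0
    simp [← h1, h2]
  · simp [hk]

-- the inner loop of A collapses to one insert of the folded accumulator
theorem pv_foldA (ik : String) (idx : Int) :
    ∀ (l : List (String × Int)) (od : PySem.Dict Int (PySem.Dict String Int)),
    od.contains idx = true → od.keys.Nodup →
    l.foldl (fun od kv =>
      let inner := od.getD idx PySem.Dict.empty
      if inner.contains kv.1 = false then od.insert idx (inner.insert kv.1 kv.2)
      else if kv.1 ≠ ik then od.insert idx (inner.insert kv.1 (inner.getD kv.1 0 + kv.2))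
      else od) od
    = od.insert idx (l.foldl (pvMergeField ik) (od.getD idx PySem.Dict.empty)) := by
  intro l
  induction l with
  | nil => intro od hc hnd; exact (pv_insert_getD_self od idx _ hc hnd).symm
  | cons kv l ih =>
    intro od hc hnd
    have hF : (let inner := od.getD idx PySem.Dict.empty
        if inner.contains kv.1 = false then od.insert idx (inner.insert kv.1 kv.2)
        else if kv.1 ≠ ik then od.insert idx (inner.insert kv.1 (inner.getD kv.1 0 + kv.2))
        else od)
        = od.insert idx (pvMergeField ik (od.getD idx PySem.Dict.empty) kv) := by
      simp only [pvMergeField]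
      split_ifs with h1 h2
      · rfl
      · rfl
      · exact (pv_insert_getD_self od idx _ hc hnd).symm
    rw [List.foldl_cons, hF,
        ih _ (PySem.Dict.contains_insert_self _ _ _) (PySem.Dict.nodup_keys_insert _ _ _ hnd),
        PySem.Dict.getD_insert_self, PySem.Dict.insert_insert_self, List.foldl_cons]

-- simulation invariant: A's dict-of-accumulators is B's groups dict mapped through pvReduceGroup
theorem pv_outer (ik : String) :
    ∀ (l : List (List (String × Int)))
      (od : PySem.Dict Int (PySem.Dict String Int))
      (g : PySem.Dict Int (List (List (String × Int)))),
    od.items = g.items.map (fun p => (p.1, pvReduceGroup ik p.2)) → g.keys.Nodup →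
    (l.foldl (fun od d =>
      match List.lookup ik d with
      | none => od
      | some index =>
        let od := if od.contains index then od else od.insert index PySem.Dict.empty
        d.foldl (fun od kv =>
          let inner := od.getD index PySem.Dict.empty
          if inner.contains kv.1 = false then od.insert index (inner.insert kv.1 kv.2)
          else if kv.1 ≠ ik then od.insert index (inner.insert kv.1 (inner.getD kv.1 0 + kv.2))
          else od) od) od).items
    = (l.foldl (fun g d =>
      match List.lookup ik d with
      | none => g
      | some idx => g.insert idx (g.getD idx [] ++ [d])) g).items.map
        (fun p => (p.1, pvReduceGroup ik p.2)) := by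
  intro l
  induction l with
  | nil => intro od g hinv hnd; simpa using hinv
  | cons d l ih =>
    intro od g hinv hnd
    have hkeys : od.keys = g.keys := by
      simp only [PySem.Dict.keys, hinv, List.map_map]; rfl
    have hndod : od.keys.Nodup := by rw [hkeys]; exact hnd
    cases hlk : List.lookup ik d with
    | none => simp only [List.foldl_cons, hlk]; exact ih od g hinv hnd
    | some idx =>
      simp only [List.foldl_cons, hlk]
      have hceq : od.contains idx = g.contains idx := by
        rw [PySem.Dict.contains_eq_decide_mem_keys, PySem.Dict.contains_eq_decide_mem_keys, hkeys]
      by_cases hc : g.contains idx = true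
      · -- key already grouped
        have hcod : od.contains idx = true := by rw [hceq]; exact hc
        obtain ⟨ds, hds⟩ : ∃ ds, g.get? idx = some ds := by
          have := PySem.Dict.contains_eq_isSome_get? g idx
          rw [hc] at this
          exact Option.isSome_iff_exists.mp this.symm
        have hmem : (idx, ds) ∈ g.items := PySem.Dict.mem_items_of_get?_eq_some g hds
        have hgd : g.getD idx [] = ds := PySem.Dict.getD_of_get?_eq_some g _ hds
        have hodmem : (idx, pvReduceGroup ik ds) ∈ od.items := by
          rw [hinv]; exact List.mem_map.mpr ⟨(idx, ds), hmem, rfl⟩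
        have hodgd : od.getD idx PySem.Dict.empty = pvReduceGroup ik ds :=
          PySem.Dict.getD_of_mem_items od hodmem hndod _
        rw [if_pos hcod]
        rw [pv_foldA ik idx d od hcod hndod]
        apply ih
        · rw [PySem.Dict.items_insert_of_contains _ _ hcod,
              PySem.Dict.items_insert_of_contains _ _ hc, hinv, List.map_map, List.map_map]
          apply List.map_congr_left
          intro p hp
          by_cases hk : p.1 == idx
          · simp only [Function.comp, hk, if_pos, hodgd]
            have : pvReduceGroup ik (g.getD idx [] ++ [d]) = d.foldl (pvMergeField ik) (pvReduceGroup ik ds) := by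
              rw [hgd]; simp [pvReduceGroup, List.foldl_append]
            simp [this]
          · simp [Function.comp, hk]
        · exact PySem.Dict.nodup_keys_insert _ _ _ hnd
      · -- new key
        have hcf : g.contains idx = false := by simpa using hc
        have hcodf : od.contains idx = false := by rw [hceq]; exact hcf
        rw [if_neg (by simp [hcodf])]
        rw [pv_foldA ik idx d _ (PySem.Dict.contains_insert_self _ _ _)
            (PySem.Dict.nodup_keys_insert _ _ _ hndod)]
        rw [PySem.Dict.getD_insert_self, PySem.Dict.insert_insert_self]
        apply ih
        · rw [PySem.Dict.items_insert_of_not_contains _ _ hcodf,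
              PySem.Dict.items_insert_of_not_contains _ _ hcf, hinv, List.map_append]
          simp [PySem.Dict.getD_of_not_contains g _ hcf, pvReduceGroup]
        · exact PySem.Dict.nodup_keys_insert _ _ _ hnd

-- ===== VERDICT (by name: the statement is the Claim_ definition above) =====
theorem sum_by_common_key_spec : Claim_equal_sum_by_common_key := by
  intro input_list index_key _hdom _hpre
  unfold Spec_sum_by_common_key sum_by_common_key sum_by_common_key_alt
  have h := pv_outer index_key input_list PySem.Dict.empty PySem.Dict.empty
    rfl PySem.Dict.nodup_keys_empty
  simp only [PySem.Dict.values, h, List.map_map]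
  rfl
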